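-- pv_equiv track=rewrite | github.com/ziebam/aoc2024 | day20/day20.py | part2
-- ===== SOURCE A (Python) =====
-- DIRECTIONS = ((0, -1), (0, 1), (-1, 0), (1, 0))
--
-- def part2(data):
--     start = end = None
--     path_tiles = set()
--     for y, row in enumerate(data[1:-1], start=1):
--         for x, tile in enumerate(row[1:-1], start=1):
--             match tile:
--                 case ".":
--                     path_tiles.add((x, y))
--                 case "S":
--                     start = (x, y)
--                 case "E":
--                     end = (x, y)
--
--     path = {0: start}
--     current = start
--     n = 1
--     while path_tiles:
--         x, y = current
--         for dx, dy in DIRECTIONS: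
--             if (next := (x + dx, y + dy)) in path_tiles:
--                 path[n] = next
--                 path_tiles.remove(next)
--                 current = next
--                 n += 1
--                 break
--     path[n] = end
--     l = len(path)
--
--     out = 0
--     for step, tile in path.items():
--         if step == l - 100:
--             break
--
--         for i in range(step + 101, l):
--             x1, y1 = tile
--             x2, y2 = path[i]
--             d = abs(x1 - x2) + abs(y1 - y2)
--             if d <= 20 and i - step - d >= 100:
--                 out += 1
--
--     return out
-- ===== SOURCE B (Python) =====
-- def part2(data):
--     # One flat pass: every interesting interior cell as a (pos, char) record.
--     cells = [((x, y), ch)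
--              for y, row in enumerate(data[1:-1], start=1)
--              for x, ch in enumerate(row[1:-1], start=1)
--              if ch in ".SE"]
--     starts = [pos for pos, ch in cells if ch == "S"]
--     ends = [pos for pos, ch in cells if ch == "E"]
--     if not starts or not ends:
--         return 0
--     start, end = starts[-1], ends[-1]
--     tiles = {pos for pos, ch in cells if ch == "."}
--
--     # Reconstruct the corridor back-to-front: prepend each tile, reverse once.
--     rev = [start]
--     cur = start
--     while tiles:
--         x, y = cur
--         for nxt in ((x, y - 1), (x, y + 1), (x - 1, y), (x + 1, y)):
--             if nxt in tiles:
--                 tiles.remove(nxt)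
--                 rev = [nxt] + rev
--                 cur = nxt
--                 break
--     path = rev[::-1] + [end]
--
--     # coords -> step index; scan only the Manhattan-radius-20 neighbourhood.
--     steps = {pos: i for i, pos in enumerate(path)}
--     offsets = [(dx, dy)
--                for dx in range(-20, 21)
--                for dy in range(-20, 21)
--                if abs(dx) + abs(dy) <= 20]
--     out = 0
--     for s, (x, y) in enumerate(path):
--         for dx, dy in offsets:
--             i = steps.get((x + dx, y + dy))
--             if i is not None and i - s - abs(dx) - abs(dy) >= 100:
--                 out += 1
--     return out
-- ===== Notes on version B (the rewrite author's own statement) =====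
-- stated objective: alternative
-- what changed: B parses the grid as one flat filtered (pos,char) list from which start/end/tiles are selected by comprehensions (instead of A's stateful triple-accumulator fold), rebuilds the corridor back-to-front by prepending and reversing once (instead of A's step-number dictionary), and replaces A's counting loop over all indices at least 101 further along the path by a coordinates-to-step dictionary queried only on the 841-cell Manhattan-radius-20 neighbourhood of each path tile.
-- outside the precondition, e.g. on part2(['######', '#S..E#', '#....#', '######']): A returns 0, B returns 0
import Mathlib
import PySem

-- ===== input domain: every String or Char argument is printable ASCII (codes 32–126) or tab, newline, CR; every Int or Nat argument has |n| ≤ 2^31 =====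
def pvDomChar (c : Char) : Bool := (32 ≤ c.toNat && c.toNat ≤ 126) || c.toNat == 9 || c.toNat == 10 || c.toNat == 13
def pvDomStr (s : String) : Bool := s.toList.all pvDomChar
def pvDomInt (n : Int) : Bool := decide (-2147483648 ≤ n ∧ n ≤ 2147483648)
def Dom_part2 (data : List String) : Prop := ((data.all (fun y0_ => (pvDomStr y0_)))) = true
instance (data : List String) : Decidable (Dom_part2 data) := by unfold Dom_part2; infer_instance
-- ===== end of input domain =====

-- B parses the interior as one flat filtered (pos,char) list and selects start/end/tiles
-- from it, rebuilds the corridor back-to-front (prepend, one final reverse) instead of A's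
-- step-number dictionary, and counts with a coords→step dictionary queried only on the
-- Manhattan-radius-20 neighbourhood of each tile (an alternative algorithm; no speed claimed).

-- ===== PORT A =====

def pvDirs : List (Int × Int) := [(0,-1),(0,1),(-1,0),(1,0)]

-- state: (start, end, path_tiles)
def pvScanCell (y : Int) (st : Option (Int × Int) × Option (Int × Int) × PySem.Set (Int × Int))
    (xc : Int × Char) : Option (Int × Int) × Option (Int × Int) × PySem.Set (Int × Int) :=
  if xc.2 = '.' then (st.1, st.2.1, PySem.Set.add st.2.2 (xc.1, y))
  else if xc.2 = 'S' then (some (xc.1, y), st.2.1, st.2.2)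
  else if xc.2 = 'E' then (st.1, some (xc.1, y), st.2.2)
  else st

def pvScanRow (st : Option (Int × Int) × Option (Int × Int) × PySem.Set (Int × Int))
    (yrow : Int × String) : Option (Int × Int) × Option (Int × Int) × PySem.Set (Int × Int) :=
  (PySem.List.enumerate (PySem.List.slice yrow.2.toList (some 1) (some (-1))) 1).foldl
    (pvScanCell yrow.1) st

def pvScanGrid (data : List String) :
    Option (Int × Int) × Option (Int × Int) × PySem.Set (Int × Int) :=
  (PySem.List.enumerate (PySem.List.slice data (some 1) (some (-1))) 1).foldl
    pvScanRow (none, none, PySem.Set.empty)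

-- the while loop; fuel = number of remaining tiles (each Python iteration removes one;
-- if no neighbouring tile is found Python loops forever — those inputs are outside Pre_part2,
-- the port stops there)
def pvWalkA : Nat → PySem.Set (Int × Int) → PySem.Dict Int (Int × Int) → (Int × Int) → Int →
    PySem.Dict Int (Int × Int) × Int
  | 0, _, path, _, n => (path, n)
  | fuel+1, tiles, path, cur, n =>
    match pvDirs.find? (fun d => PySem.Set.contains tiles (cur.1 + d.1, cur.2 + d.2)) with
    | some d =>
      pvWalkA fuel (PySem.Set.discard tiles (cur.1 + d.1, cur.2 + d.2))
        (path.insert n (cur.1 + d.1, cur.2 + d.2)) (cur.1 + d.1, cur.2 + d.2) (n + 1)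
    | none => (path, n)

def pvInnerA (path : PySem.Dict Int (Int × Int)) (l step : Int) (tile : Int × Int)
    (out : Int) : Int :=
  (PySem.List.pyRange (step + 101) l 1).foldl (fun acc i =>
    let t2 := path.getD i (0, 0)   -- path[i]: the keys are exactly 0..l-1, no KeyError
    let d := |tile.1 - t2.1| + |tile.2 - t2.2|
    if d ≤ 20 ∧ 100 ≤ i - step - d then acc + 1 else acc) out

def pvOuterA (path : PySem.Dict Int (Int × Int)) (l : Int) :
    List (Int × (Int × Int)) → Int → Int
  | [], out => out
  | (step, tile) :: rest, out =>
    if step = l - 100 then out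
    else pvOuterA path l rest (pvInnerA path l step tile out)

-- l = len(path); then the counting loop over path.items() with its break
def pvCountA (path : PySem.Dict Int (Int × Int)) : Int :=
  pvOuterA path (path.size : Int) path.items 0

def part2 (data : List String) : Int :=
  match pvScanGrid data with
  | (some start, some end_, tiles) =>
    pvCountA ((pvWalkA tiles.length tiles (PySem.Dict.empty.insert 0 start) start 1).1.insert
      (pvWalkA tiles.length tiles (PySem.Dict.empty.insert 0 start) start 1).2 end_)
  | _ => 0   -- no 'S'/'E' in the interior: Python raises TypeError; outside Pre_part2

-- ===== PORT B =====

-- cells = [((x, y), ch) for … for … if ch in ".SE"]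
def pvCellsB (data : List String) : List ((Int × Int) × Char) :=
  (PySem.List.enumerate (PySem.List.slice data (some 1) (some (-1))) 1).flatMap (fun yr =>
    (PySem.List.enumerate (PySem.List.slice yr.2.toList (some 1) (some (-1))) 1).filterMap
      (fun xc => if xc.2 = '.' ∨ xc.2 = 'S' ∨ xc.2 = 'E'
                 then some ((xc.1, yr.1), xc.2) else none))

-- the while loop, building the path back-to-front; fuel = number of remaining tiles
def pvWalkRevB : Nat → PySem.Set (Int × Int) → List (Int × Int) → (Int × Int) →
    List (Int × Int)
  | 0, _, rev, _ => rev
  | fuel+1, tiles, rev, cur =>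
    ([(cur.1, cur.2 - 1), (cur.1, cur.2 + 1),
      (cur.1 - 1, cur.2), (cur.1 + 1, cur.2)].find?
        (fun nxt => PySem.Set.contains tiles nxt)).elim rev
      (fun nxt => pvWalkRevB fuel (PySem.Set.discard tiles nxt) (nxt :: rev) nxt)

def pvOffsets : List (Int × Int) :=
  (PySem.List.pyRange (-20) 21 1).flatMap (fun dx =>
    ((PySem.List.pyRange (-20) 21 1).filter (fun dy => decide (|dx| + |dy| ≤ 20))).map
      (fun dy => (dx, dy)))

-- steps = {pos: i for i, pos in enumerate(path)}
def pvSteps (path : List (Int × Int)) : PySem.Dict (Int × Int) Int :=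
  (PySem.List.enumerate path 0).foldl
    (fun d (p : Int × (Int × Int)) => d.insert p.2 p.1) PySem.Dict.empty

def pvCountB (steps : PySem.Dict (Int × Int) Int) (out : Int) (s : Int) (pos : Int × Int) : Int :=
  pvOffsets.foldl (fun out2 off =>
    match steps.get? (pos.1 + off.1, pos.2 + off.2) with
    | some i => if 100 ≤ i - s - |off.1| - |off.2| then out2 + 1 else out2
    | none => out2) out

def pvCountBAll (steps : PySem.Dict (Int × Int) Int) (path : List (Int × Int)) : Int :=
  (PySem.List.enumerate path 0).foldl
    (fun out (p : Int × (Int × Int)) => pvCountB steps out p.1 p.2) 0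

def part2_alt (data : List String) : Int :=
  (((pvCellsB data).filter (fun c => decide (c.2 = 'S'))).getLast?).elim 0 (fun sC =>
    (((pvCellsB data).filter (fun c => decide (c.2 = 'E'))).getLast?).elim 0 (fun eC =>
      let tiles := PySem.Set.ofList
        (((pvCellsB data).filter (fun c => decide (c.2 = '.'))).map Prod.fst)
      let path := (pvWalkRevB tiles.length tiles [sC.1] sC.1).reverse ++ [eC.1]
      pvCountBAll (pvSteps path) path))

-- ===== PRECONDITION & SPEC =====

-- Pre_part2 excludes grids whose (nonempty) interior '.' tiles do not form a single corridor
-- from 'S' with exactly one adjacent tile at every step — there A raises TypeError (no 'S'),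
-- loops forever (unreachable tiles), or consumes the tiles in an order that is an accident of
-- its greedy tie-breaking — and corridor grids of 100 or more tiles without an 'E', where A
-- raises TypeError when the counting loop reaches the leftover None.

-- the interior cells of the grid: rows 1..len-2, columns 1..len(row)-2
def pvInteriorP (data : List String) : List ((Int × Int) × Char) :=
  (List.range data.length).flatMap (fun y =>
    if y = 0 ∨ y + 1 = data.length then [] else
    (List.range (data.getD y "").toList.length).filterMap (fun x =>
      if x = 0 ∨ x + 1 = (data.getD y "").toList.length then none
      else some (((x : Int), (y : Int)), (data.getD y "").toList.getD x ' ')))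

def pvDotsP (data : List String) : List (Int × Int) :=
  (pvInteriorP data).filterMap (fun c => if c.2 = '.' then some c.1 else none)

def pvStartP (data : List String) : Option (Int × Int) :=
  ((pvInteriorP data).filterMap (fun c => if c.2 = 'S' then some c.1 else none)).getLast?

-- 'the tiles T form a single corridor from c: exactly one tile of T is adjacent to the
-- current cell at every step' (shape predicate, by recursion on the remaining tiles)
def pvCorridorP (c : Int × Int) (T : List (Int × Int)) : Bool :=
  if _hT : T.isEmpty then true
  else
    match hf : T.filter (fun t => decide (|t.1 - c.1| + |t.2 - c.2| = 1)) with
    | [t] => pvCorridorP t (T.erase t)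
    | _ => false
termination_by T.length
decreasing_by
  have ht : t ∈ T := List.mem_of_mem_filter (hf ▸ List.mem_singleton_self t)
  have hpos : 0 < T.length := List.length_pos_of_mem ht
  rw [List.length_erase_of_mem ht]
  omega

def Pre_part2 (data : List String) : Prop :=
  ((pvDotsP data).isEmpty
    || ((pvStartP data).isSome
        && pvCorridorP ((pvStartP data).getD (0,0)) (pvDotsP data)
        && ((pvInteriorP data).any (fun c => decide (c.2 = 'E'))
            || decide ((pvDotsP data).length ≤ 99)))) = true
instance (data : List String) : Decidable (Pre_part2 data) := by unfold Pre_part2; infer_instance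
def pvWitness_part2 : List String := ["####", "#SE#", "####"]

def Spec_part2 (data : List String) (out : Int) : Prop := out = part2_alt data
instance (data : List String) (out : Int) : Decidable (Spec_part2 data out) := by
  unfold Spec_part2; infer_instance

-- ===== CLAIM (what is proved, stated in full; the proofs are below) =====
def Claim_equal_part2 : Prop :=
  ∀ (data : List String), Dom_part2 data → Pre_part2 data → Spec_part2 data (part2 data)


-- ===== LEMMAS AND PROOFS =====

-- ---- generic facts about PySem.List.enumerate ----

theorem pv_enum_nil {a : Type} (s : Int) : PySem.List.enumerate ([] : List a) s = [] := rfl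

theorem pv_enum_length {a : Type} : forall (L : List a) (s : Int),
    (PySem.List.enumerate L s).length = L.length := by
  intro L
  induction L with
  | nil => intro s; rfl
  | cons x xs ih => intro s; rw [PySem.List.enumerate_cons]; simp [ih]

theorem pv_enum_snd {a : Type} : forall (L : List a) (s : Int),
    (PySem.List.enumerate L s).map Prod.snd = L := by
  intro L
  induction L with
  | nil => intro s; rfl
  | cons x xs ih => intro s; rw [PySem.List.enumerate_cons]; simp [ih]

theorem pv_enum_fst_bound {a : Type} : forall (L : List a) (s : Int) (p : Int × a),
    p ∈ PySem.List.enumerate L s → s ≤ p.1 ∧ p.1 < s + L.length := by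
  intro L
  induction L with
  | nil => intro s p hp; simp at hp
  | cons x xs ih =>
    intro s p hp
    rw [PySem.List.enumerate_cons] at hp
    rcases List.mem_cons.mp hp with h | h
    · subst h; exact ⟨le_refl _, by simp only [List.length_cons]; push_cast; omega⟩
    · have := ih (s+1) p h
      simp only [List.length_cons]
      push_cast
      omega

theorem pv_enum_fst_nodup {a : Type} : forall (L : List a) (s : Int),
    ((PySem.List.enumerate L s).map Prod.fst).Nodup := by
  intro L
  induction L with
  | nil => intro s; simp
  | cons x xs ih =>
    intro s
    rw [PySem.List.enumerate_cons, List.map_cons]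
    refine List.Nodup.cons ?_ (ih (s+1))
    intro hmem
    rcases List.mem_map.mp hmem with ⟨p, hp, hfst⟩
    have := pv_enum_fst_bound xs (s+1) p hp
    omega

theorem pv_mem_enum {a : Type} (dflt : a) : forall (L : List a) (s : Int) (k : Nat),
    k < L.length → (s + (k : Int), L.getD k dflt) ∈ PySem.List.enumerate L s := by
  intro L
  induction L with
  | nil => intro s k hk; simp at hk
  | cons x xs ih =>
    intro s k hk
    rw [PySem.List.enumerate_cons]
    match k with
    | 0 => simp
    | Nat.succ k =>
      refine List.mem_cons_of_mem _ ?_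
      have := ih (s+1) k (by simpa using hk)
      have heq : s + ((k+1 : Nat) : Int) = (s+1) + (k : Int) := by push_cast; ring
      rw [heq]
      simpa using this

theorem pv_enum_mem {a : Type} (dflt : a) : forall (L : List a) (s : Int) (p : Int × a),
    p ∈ PySem.List.enumerate L s →
    ∃ k : Nat, k < L.length ∧ p.1 = s + (k : Int) ∧ p.2 = L.getD k dflt := by
  intro L
  induction L with
  | nil => intro s p hp; simp at hp
  | cons x xs ih =>
    intro s p hp
    rw [PySem.List.enumerate_cons] at hp
    rcases List.mem_cons.mp hp with h | h
    · exact ⟨0, by simp, by simp [h], by simp [h]⟩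
    · obtain ⟨k, hk, h1, h2⟩ := ih (s+1) p h
      refine ⟨k+1, by simpa using hk, ?_, by simpa using h2⟩
      push_cast
      omega

theorem pv_enum_sum {a : Type} (dflt : a) (f : Int × a → Int) : forall (L : List a) (s : Int),
    ((PySem.List.enumerate L s).map f).sum
      = ((List.range L.length).map (fun (j : Nat) => f (s + (j : Int), L.getD j dflt))).sum := by
  intro L
  induction L with
  | nil => intro s; rfl
  | cons x xs ih =>
    intro s
    rw [PySem.List.enumerate_cons, List.map_cons, List.sum_cons, ih (s+1)]
    rw [List.length_cons, List.range_succ_eq_map, List.map_cons, List.sum_cons]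
    simp only [List.map_map]
    congr 1
    · simp
    · refine congrArg _ (List.map_congr_left ?_)
      intro j hj
      simp only [Function.comp_apply, List.getD_cons_succ]
      congr 2
      push_cast
      ring

-- ---- distinctness of the parsed positions ----

def pvPLt (p : Int × Int) (Y X : Int) : Prop := p.2 < Y ∨ (p.2 = Y ∧ p.1 < X)

def pvBnd (st : Option (Int × Int) × Option (Int × Int) × PySem.Set (Int × Int))
    (Y X : Int) : Prop :=
  (∀ p ∈ st.2.2, pvPLt p Y X) ∧ (∀ s, st.1 = some s → pvPLt s Y X) ∧
    (∀ e, st.2.1 = some e → pvPLt e Y X)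

def pvDist (st : Option (Int × Int) × Option (Int × Int) × PySem.Set (Int × Int)) : Prop :=
  st.2.2.Nodup ∧ (∀ s, st.1 = some s → s ∉ st.2.2) ∧ (∀ e, st.2.1 = some e → e ∉ st.2.2) ∧
    (∀ s e, st.1 = some s → st.2.1 = some e → s ≠ e)

theorem pv_cell_step (y x : Int) (c : Char)
    (st : Option (Int × Int) × Option (Int × Int) × PySem.Set (Int × Int))
    (hb : pvBnd st y x) (hd : pvDist st) :
    pvBnd (pvScanCell y st (x, c)) y (x + 1) ∧ pvDist (pvScanCell y st (x, c)) := by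
  obtain ⟨hbT, hbS, hbE⟩ := hb
  obtain ⟨hnd, hsT, heT, hse⟩ := hd
  have hfresh : ∀ p : Int × Int, pvPLt p y x → p ≠ (x, y) := by
    rintro p hp rfl
    simp only [pvPLt] at hp
    omega
  have hweak : ∀ p : Int × Int, pvPLt p y x → pvPLt p y (x + 1) := by
    intro p hp
    simp only [pvPLt] at hp ⊢
    omega
  have hnew : pvPLt (x, y) y (x + 1) := Or.inr ⟨rfl, by omega⟩
  unfold pvScanCell
  split_ifs with h1 h2 h3
  · -- '.' : add a tile
    refine ⟨⟨?_, ?_, ?_⟩, ?_, ?_, ?_, ?_⟩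
    · intro p hp
      rcases (PySem.Set.mem_add st.2.2 _ p).mp hp with h | h
      · exact hweak p (hbT p h)
      · subst h; exact hnew
    · intro s hs; exact hweak s (hbS s hs)
    · intro e he; exact hweak e (hbE e he)
    · exact PySem.Set.nodup_add st.2.2 _ hnd
    · intro s hs hmem
      rcases (PySem.Set.mem_add st.2.2 _ s).mp hmem with h | h
      · exact hsT s hs h
      · exact hfresh s (hbS s hs) h
    · intro e he hmem
      rcases (PySem.Set.mem_add st.2.2 _ e).mp hmem with h | h
      · exact heT e he h
      · exact hfresh e (hbE e he) h
    · exact hse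
  · -- 'S'
    refine ⟨⟨fun p hp => hweak p (hbT p hp), ?_, fun e he => hweak e (hbE e he)⟩,
        hnd, ?_, heT, ?_⟩
    · intro s hs; injection hs with h; subst h; exact hnew
    · intro s hs hmem; injection hs with h; subst h; exact absurd rfl (hfresh _ (hbT _ hmem))
    · intro s e hs he; injection hs with h; subst h
      exact fun heq => hfresh e (hbE e he) heq.symm
  · -- 'E'
    refine ⟨⟨fun p hp => hweak p (hbT p hp), fun s hs => hweak s (hbS s hs), ?_⟩,
        hnd, hsT, ?_, ?_⟩
    · intro e he; injection he with h; subst h; exact hnew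
    · intro e he hmem; injection he with h; subst h; exact absurd rfl (hfresh _ (hbT _ hmem))
    · intro s e hs he; injection he with h; subst h
      exact fun heq => hfresh s (hbS s hs) heq
  · exact ⟨⟨fun p hp => hweak p (hbT p hp), fun s hs => hweak s (hbS s hs),
      fun e he => hweak e (hbE e he)⟩, hnd, hsT, heT, hse⟩

theorem pv_row_fold (y : Int) : forall (cs : List Char) (x : Int)
    (st : Option (Int × Int) × Option (Int × Int) × PySem.Set (Int × Int)),
    pvBnd st y x → pvDist st →
    pvBnd ((PySem.List.enumerate cs x).foldl (pvScanCell y) st) y (x + cs.length) ∧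
      pvDist ((PySem.List.enumerate cs x).foldl (pvScanCell y) st) := by
  intro cs
  induction cs with
  | nil => intro x st hb hd; simpa [pv_enum_nil] using ⟨hb, hd⟩
  | cons c cs ih =>
    intro x st hb hd
    rw [PySem.List.enumerate_cons, List.foldl_cons]
    obtain ⟨hb', hd'⟩ := pv_cell_step y x c st hb hd
    have := ih (x+1) _ hb' hd'
    simp only [List.length_cons]
    have heq : x + ((cs.length + 1 : Nat) : Int) = (x + 1) + (cs.length : Int) := by
      push_cast; ring
    rw [heq]
    exact this

theorem pv_bnd_weaken (st : Option (Int × Int) × Option (Int × Int) × PySem.Set (Int × Int))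
    (Y X Y' : Int) (h : pvBnd st Y X) (hY : Y < Y') : pvBnd st Y' 1 := by
  obtain ⟨hT, hS, hE⟩ := h
  have w : ∀ p : Int × Int, pvPLt p Y X → pvPLt p Y' 1 := by
    intro p hp
    simp only [pvPLt] at hp ⊢
    omega
  exact ⟨fun p hp => w p (hT p hp), fun s hs => w s (hS s hs), fun e he => w e (hE e he)⟩

theorem pv_grid_fold : forall (rows : List String) (y : Int)
    (st : Option (Int × Int) × Option (Int × Int) × PySem.Set (Int × Int)),
    pvBnd st y 1 → pvDist st →
    pvDist ((PySem.List.enumerate rows y).foldl pvScanRow st) := by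
  intro rows
  induction rows with
  | nil => intro y st _ hd; simpa [pv_enum_nil] using hd
  | cons r rows ih =>
    intro y st hb hd
    rw [PySem.List.enumerate_cons, List.foldl_cons]
    obtain ⟨hb', hd'⟩ := pv_row_fold y _ 1 st hb hd
    exact ih (y+1) _ (pv_bnd_weaken _ y _ (y+1) hb' (by omega)) hd'

theorem pv_scan_dist (data : List String) : pvDist (pvScanGrid data) := by
  unfold pvScanGrid
  apply pv_grid_fold _ 1
  · exact ⟨by intro p hp; simp [PySem.Set.empty] at hp, by intro s hs; simp at hs,
      by intro e he; simp at he⟩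
  · exact ⟨by simp [PySem.Set.empty], by intro s hs; simp at hs, by intro e he; simp at he,
      by intro s e hs; simp at hs⟩

-- ---- A's parse as a fold over the flat cell list; B's selections read off that fold ----

def pvCellStep (st : Option (Int × Int) × Option (Int × Int) × PySem.Set (Int × Int))
    (c : (Int × Int) × Char) : Option (Int × Int) × Option (Int × Int) × PySem.Set (Int × Int) :=
  if c.2 = '.' then (st.1, st.2.1, PySem.Set.add st.2.2 c.1)
  else if c.2 = 'S' then (some c.1, st.2.1, st.2.2)
  else if c.2 = 'E' then (st.1, some c.1, st.2.2)
  else st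

def pvCellsAll (data : List String) : List ((Int × Int) × Char) :=
  (PySem.List.enumerate (PySem.List.slice data (some 1) (some (-1))) 1).flatMap (fun yr =>
    (PySem.List.enumerate (PySem.List.slice yr.2.toList (some 1) (some (-1))) 1).map
      (fun xc => ((xc.1, yr.1), xc.2)))

def pvKeep (c : (Int × Int) × Char) : Bool := decide (c.2 = '.' ∨ c.2 = 'S' ∨ c.2 = 'E')

theorem pv_scanRow_cells (st : Option (Int × Int) × Option (Int × Int) × PySem.Set (Int × Int))
    (yr : Int × String) :
    pvScanRow st yr
      = ((PySem.List.enumerate (PySem.List.slice yr.2.toList (some 1) (some (-1))) 1).map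
          (fun xc => ((xc.1, yr.1), xc.2))).foldl pvCellStep st := by
  rw [List.foldl_map]
  rfl

theorem pv_scanGrid_cells (data : List String) :
    pvScanGrid data = (pvCellsAll data).foldl pvCellStep (none, none, PySem.Set.empty) := by
  unfold pvScanGrid pvCellsAll
  generalize PySem.List.enumerate (PySem.List.slice data (some 1) (some (-1))) 1 = rows
  generalize hst : ((none, none, PySem.Set.empty) :
    Option (Int × Int) × Option (Int × Int) × PySem.Set (Int × Int)) = st
  clear hst
  induction rows generalizing st with
  | nil => rfl
  | cons yr rows ih =>
    rw [List.foldl_cons, List.flatMap_cons, List.foldl_append, pv_scanRow_cells, ih]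

theorem pv_cellStep_skip (st : Option (Int × Int) × Option (Int × Int) × PySem.Set (Int × Int))
    (c : (Int × Int) × Char) (h : pvKeep c = false) : pvCellStep st c = st := by
  unfold pvKeep at h
  unfold pvCellStep
  simp only [decide_eq_false_iff_not, not_or] at h
  rw [if_neg h.1, if_neg h.2.1, if_neg h.2.2]

theorem pv_fold_filter_keep :
    forall (cs : List ((Int × Int) × Char))
      (st : Option (Int × Int) × Option (Int × Int) × PySem.Set (Int × Int)),
    cs.foldl pvCellStep st = (cs.filter pvKeep).foldl pvCellStep st := by
  intro cs
  induction cs with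
  | nil => intro st; rfl
  | cons c cs ih =>
    intro st
    by_cases h : pvKeep c
    · rw [List.foldl_cons, List.filter_cons_of_pos h, List.foldl_cons, ih]
    · rw [List.foldl_cons, List.filter_cons_of_neg (by simpa using h),
        pv_cellStep_skip st c (by simpa using h), ih]

theorem pv_rowcells_filter (yr : Int × String) :
    (PySem.List.enumerate (PySem.List.slice yr.2.toList (some 1) (some (-1))) 1).filterMap
        (fun xc => if xc.2 = '.' ∨ xc.2 = 'S' ∨ xc.2 = 'E'
                   then some ((xc.1, yr.1), xc.2) else none)
      = ((PySem.List.enumerate (PySem.List.slice yr.2.toList (some 1) (some (-1))) 1).map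
          (fun xc => ((xc.1, yr.1), xc.2))).filter pvKeep := by
  generalize PySem.List.enumerate (PySem.List.slice yr.2.toList (some 1) (some (-1))) 1 = l
  induction l with
  | nil => rfl
  | cons xc l ih =>
    rw [List.map_cons, List.filterMap_cons, List.filter_cons]
    by_cases h : xc.2 = '.' ∨ xc.2 = 'S' ∨ xc.2 = 'E'
    · rw [if_pos h, show pvKeep ((xc.1, yr.1), xc.2) = true from by
        unfold pvKeep; simpa using h, ih]
      rfl
    · rw [if_neg h, show pvKeep ((xc.1, yr.1), xc.2) = false from by
        unfold pvKeep; simpa using h, ih]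
      rfl

theorem pv_cellsB_eq_filter (data : List String) :
    pvCellsB data = (pvCellsAll data).filter pvKeep := by
  unfold pvCellsB pvCellsAll
  rw [List.filter_flatMap]
  exact congrArg (fun f => List.flatMap f
    (PySem.List.enumerate (PySem.List.slice data (some 1) (some (-1))) 1))
    (funext pv_rowcells_filter)

theorem pv_fold_fst (cs : List ((Int × Int) × Char))
    (st : Option (Int × Int) × Option (Int × Int) × PySem.Set (Int × Int)) :
    (cs.foldl pvCellStep st).1
      = ((cs.filter (fun c => decide (c.2 = 'S'))).getLast?).elim st.1 (fun c => some c.1) := by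
  induction cs using List.reverseRecOn with
  | nil => rfl
  | append_singleton l c ih =>
    rw [List.foldl_append, List.foldl_cons, List.foldl_nil, List.filter_append]
    by_cases hS : c.2 = 'S'
    · have hf : List.filter (fun c => decide (c.2 = 'S')) [c] = [c] := by simp [hS]
      rw [hf, List.getLast?_concat]
      unfold pvCellStep
      rw [if_neg (by rw [hS]; decide), if_pos hS]
      rfl
    · have hf : List.filter (fun c => decide (c.2 = 'S')) [c] = [] := by simp [hS]
      rw [hf, List.append_nil, ← ih]
      unfold pvCellStep
      split_ifs <;> rfl

theorem pv_fold_snd (cs : List ((Int × Int) × Char))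
    (st : Option (Int × Int) × Option (Int × Int) × PySem.Set (Int × Int)) :
    (cs.foldl pvCellStep st).2.1
      = ((cs.filter (fun c => decide (c.2 = 'E'))).getLast?).elim st.2.1 (fun c => some c.1) := by
  induction cs using List.reverseRecOn with
  | nil => rfl
  | append_singleton l c ih =>
    rw [List.foldl_append, List.foldl_cons, List.foldl_nil, List.filter_append]
    by_cases hE : c.2 = 'E'
    · have hf : List.filter (fun c => decide (c.2 = 'E')) [c] = [c] := by simp [hE]
      rw [hf, List.getLast?_concat]
      unfold pvCellStep
      rw [if_neg (by rw [hE]; decide), if_neg (by rw [hE]; decide), if_pos hE]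
      rfl
    · have hf : List.filter (fun c => decide (c.2 = 'E')) [c] = [] := by simp [hE]
      rw [hf, List.append_nil, ← ih]
      unfold pvCellStep
      split_ifs <;> rfl

theorem pv_fold_tiles :
    forall (cs : List ((Int × Int) × Char))
      (st : Option (Int × Int) × Option (Int × Int) × PySem.Set (Int × Int)),
    (cs.foldl pvCellStep st).2.2
      = ((cs.filter (fun c => decide (c.2 = '.'))).map Prod.fst).foldl PySem.Set.add st.2.2 := by
  intro cs
  induction cs with
  | nil => intro st; rfl
  | cons c cs ih =>
    intro st
    rw [List.foldl_cons, List.filter_cons]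
    by_cases hdot : c.2 = '.'
    · rw [if_pos (by simpa using hdot), List.map_cons, List.foldl_cons, ih]
      unfold pvCellStep
      rw [if_pos hdot]
    · rw [if_neg (by simpa using hdot), ih]
      congr 1
      unfold pvCellStep
      rw [if_neg hdot]
      split_ifs <;> rfl

theorem pv_parse (data : List String) :
    pvScanGrid data
      = (((pvCellsB data).filter (fun c => decide (c.2 = 'S'))).getLast?.elim none
            (fun c => some c.1),
         ((pvCellsB data).filter (fun c => decide (c.2 = 'E'))).getLast?.elim none
            (fun c => some c.1),
         PySem.Set.ofList
            (((pvCellsB data).filter (fun c => decide (c.2 = '.'))).map Prod.fst)) := by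
  rw [pv_scanGrid_cells, pv_fold_filter_keep, ← pv_cellsB_eq_filter]
  refine Prod.ext ?_ (Prod.ext ?_ ?_)
  · rw [pv_fold_fst]
  · rw [pv_fold_snd]
  · rw [pv_fold_tiles, PySem.Set.ofList_eq_foldl]
    rfl

-- ---- the two walks build the same path ----

theorem pv_key_fresh (d : PySem.Dict Int (Int × Int)) (L : List (Int × Int))
    (h : d.items = PySem.List.enumerate L 0) : d.contains ((L.length : Nat) : Int) = false := by
  rw [PySem.Dict.contains_eq_decide_mem_keys]
  simp only [PySem.Dict.keys, h, decide_eq_false_iff_not]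
  intro hmem
  rcases List.mem_map.mp hmem with ⟨p, hp, hfst⟩
  have := pv_enum_fst_bound L 0 p hp
  omega

theorem pv_items_snoc (d : PySem.Dict Int (Int × Int)) (L : List (Int × Int)) (v : Int × Int)
    (h : d.items = PySem.List.enumerate L 0) :
    (d.insert ((L.length : Nat) : Int) v).items = PySem.List.enumerate (L ++ [v]) 0 := by
  rw [PySem.Dict.items_insert_of_not_contains d v (pv_key_fresh d L h), h,
    PySem.List.enumerate_append]
  simp [PySem.List.enumerate_cons]

theorem pv_walk_rel : forall (fuel : Nat) (tiles : PySem.Set (Int × Int)) (cur : Int × Int)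
    (path : PySem.Dict Int (Int × Int)) (acc : List (Int × Int)),
    path.items = PySem.List.enumerate acc.reverse 0 →
    (pvWalkA fuel tiles path cur ((acc.reverse.length : Nat) : Int)).1.items
        = PySem.List.enumerate (pvWalkRevB fuel tiles acc cur).reverse 0 ∧
      (pvWalkA fuel tiles path cur ((acc.reverse.length : Nat) : Int)).2
        = (((pvWalkRevB fuel tiles acc cur).reverse.length : Nat) : Int) := by
  intro fuel
  induction fuel with
  | zero => intro tiles cur path acc h; exact ⟨h, rfl⟩
  | succ fuel ih =>
    intro tiles cur path acc h
    simp only [pvWalkA, pvWalkRevB]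
    have hmap : [(cur.1, cur.2 - 1), (cur.1, cur.2 + 1), (cur.1 - 1, cur.2), (cur.1 + 1, cur.2)]
        = pvDirs.map (fun d => (cur.1 + d.1, cur.2 + d.2)) := by
      simp [pvDirs]
      omega
    rw [hmap, List.find?_map]
    have hcomp : ((fun nxt => PySem.Set.contains tiles nxt) ∘
        fun d : Int × Int => (cur.1 + d.1, cur.2 + d.2))
        = (fun d : Int × Int => PySem.Set.contains tiles (cur.1 + d.1, cur.2 + d.2)) := rfl
    rw [hcomp]
    cases hf : pvDirs.find? (fun d => PySem.Set.contains tiles (cur.1 + d.1, cur.2 + d.2)) with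
    | none => exact ⟨h, rfl⟩
    | some d =>
      simp only [Option.map_some]
      have hsnoc := pv_items_snoc path acc.reverse (cur.1 + d.1, cur.2 + d.2) h
      rw [← List.reverse_cons] at hsnoc
      have := ih (PySem.Set.discard tiles (cur.1 + d.1, cur.2 + d.2))
        (cur.1 + d.1, cur.2 + d.2)
        (path.insert ((acc.reverse.length : Nat) : Int) (cur.1 + d.1, cur.2 + d.2))
        ((cur.1 + d.1, cur.2 + d.2) :: acc) hsnoc
      have hcast : ((((cur.1 + d.1, cur.2 + d.2) :: acc).reverse.length : Nat) : Int)
          = ((acc.reverse.length : Nat) : Int) + 1 := by simp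
      rw [hcast] at this
      exact this

theorem pv_walkRev_inv : forall (fuel : Nat) (tiles : PySem.Set (Int × Int))
    (acc : List (Int × Int)) (cur : Int × Int),
    acc.Nodup → List.Nodup tiles → (∀ t ∈ tiles, t ∉ acc) →
    (pvWalkRevB fuel tiles acc cur).Nodup ∧
      ∀ p ∈ pvWalkRevB fuel tiles acc cur, p ∈ acc ∨ p ∈ tiles := by
  intro fuel
  induction fuel with
  | zero => intro tiles acc cur hA _ _; exact ⟨hA, fun p hp => Or.inl hp⟩
  | succ fuel ih =>
    intro tiles acc cur hA hT hTA
    simp only [pvWalkRevB]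
    cases hf : [(cur.1, cur.2 - 1), (cur.1, cur.2 + 1),
        (cur.1 - 1, cur.2), (cur.1 + 1, cur.2)].find?
        (fun nxt => PySem.Set.contains tiles nxt) with
    | none => exact ⟨hA, fun p hp => Or.inl hp⟩
    | some nxt =>
      have hnxt : nxt ∈ tiles := by
        have := List.find?_some hf
        exact (PySem.Set.contains_iff tiles _).mp this
      have hA' : (nxt :: acc).Nodup :=
        List.nodup_cons.mpr ⟨hTA _ hnxt, hA⟩
      have hT' : List.Nodup (PySem.Set.discard tiles nxt) :=
        PySem.Set.nodup_discard tiles _ hT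
      have hTA' : ∀ t ∈ PySem.Set.discard tiles nxt, t ∉ nxt :: acc := by
        intro t ht
        obtain ⟨ht1, ht2⟩ := (PySem.Set.mem_discard tiles _ t).mp ht
        intro hmem
        rcases List.mem_cons.mp hmem with hm | hm
        · exact ht2 hm
        · exact hTA t ht1 hm
      obtain ⟨h1, h2⟩ := ih _ _ nxt hA' hT' hTA'
      refine ⟨h1, fun p hp => ?_⟩
      rcases h2 p hp with hm | hm
      · rcases List.mem_cons.mp hm with hm' | hm'
        · exact Or.inr (hm' ▸ hnxt)
        · exact Or.inl hm'
      · exact Or.inr ((PySem.Set.mem_discard tiles nxt p).mp hm).1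

-- ---- the common counting specification ----

def pvD (p q : Int × Int) : Int := |p.1 - q.1| + |p.2 - q.2|

def pvF (P : List (Int × Int)) (s i : Nat) : Int :=
  if pvD (P.getD s (0,0)) (P.getD i (0,0)) ≤ 20 ∧
      100 ≤ (i : Int) - (s : Int) - pvD (P.getD s (0,0)) (P.getD i (0,0)) then 1 else 0

def pvM (n : Nat) : Nat := if 100 ≤ n then n - 100 else n

theorem pv_sum_range (n : Nat) (f : Nat → Int) :
    ((List.range n).map f).sum = ∑ i ∈ Finset.range n, f i := rfl

theorem pvM_le (n : Nat) : pvM n ≤ n := by unfold pvM; split <;> omega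

theorem pvD_nonneg (p q : Int × Int) : 0 ≤ pvD p q := by
  unfold pvD; exact add_nonneg (abs_nonneg _) (abs_nonneg _)

theorem pv_V1 (P : List (Int × Int)) (hnd : P.Nodup) (s i : Nat)
    (hs : s < P.length) (hi : i < P.length) (hlt : i < s + 101) : pvF P s i = 0 := by
  unfold pvF
  split_ifs with hcond
  · exfalso
    obtain ⟨h1, h2⟩ := hcond
    have hd0 : 0 ≤ pvD (P.getD s (0,0)) (P.getD i (0,0)) := pvD_nonneg _ _
    have hdz : pvD (P.getD s (0,0)) (P.getD i (0,0)) = 0 ∧ i = s + 100 := by omega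
    have heq : P.getD s (0,0) = P.getD i (0,0) := by
      have := hdz.1
      unfold pvD at this
      have ha1 : |(P.getD s (0,0)).1 - (P.getD i (0,0)).1| = 0 := by
        have := abs_nonneg ((P.getD s (0,0)).1 - (P.getD i (0,0)).1)
        have := abs_nonneg ((P.getD s (0,0)).2 - (P.getD i (0,0)).2)
        omega
      have ha2 : |(P.getD s (0,0)).2 - (P.getD i (0,0)).2| = 0 := by
        have := abs_nonneg ((P.getD s (0,0)).1 - (P.getD i (0,0)).1)
        have := abs_nonneg ((P.getD s (0,0)).2 - (P.getD i (0,0)).2)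
        omega
      have e1 := sub_eq_zero.mp (abs_eq_zero.mp ha1)
      have e2 := sub_eq_zero.mp (abs_eq_zero.mp ha2)
      exact Prod.ext e1 e2
    rw [List.getD_eq_getElem P (0,0) hs, List.getD_eq_getElem P (0,0) hi] at heq
    have := (hnd.getElem_inj_iff).mp heq
    omega
  · rfl

theorem pv_V2 (P : List (Int × Int)) (s i : Nat)
    (hs : pvM P.length ≤ s) (hi : i < P.length) : pvF P s i = 0 := by
  unfold pvF
  split_ifs with hcond
  · exfalso
    obtain ⟨h1, h2⟩ := hcond
    have hd0 : 0 ≤ pvD (P.getD s (0,0)) (P.getD i (0,0)) := pvD_nonneg _ _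
    unfold pvM at hs
    split at hs <;> omega
  · rfl

-- ---- the offset list of B ----

theorem pv_offs_mem (off : Int × Int) : off ∈ pvOffsets ↔ |off.1| + |off.2| ≤ 20 := by
  unfold pvOffsets
  constructor
  · intro h
    rcases List.mem_flatMap.mp h with ⟨dx, hdx, hoff⟩
    rcases List.mem_map.mp hoff with ⟨dy, hdy, rfl⟩
    have := (List.mem_filter.mp hdy).2
    simpa using this
  · intro h
    have hnn1 := abs_nonneg off.1
    have hnn2 := abs_nonneg off.2
    have hle1 := le_abs_self off.1
    have hge1 := neg_abs_le off.1
    have hle2 := le_abs_self off.2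
    have hge2 := neg_abs_le off.2
    refine List.mem_flatMap.mpr ⟨off.1, PySem.List.mem_pyRange_one.mpr ⟨by omega, by omega⟩, ?_⟩
    refine List.mem_map.mpr ⟨off.2, List.mem_filter.mpr
      ⟨PySem.List.mem_pyRange_one.mpr ⟨by omega, by omega⟩, by simpa using h⟩, ?_⟩
    exact rfl

theorem pv_offs_nodup : pvOffsets.Nodup := by
  unfold pvOffsets
  rw [List.nodup_flatMap]
  constructor
  · intro dx _
    refine List.Nodup.map ?_ (List.Nodup.filter _ (PySem.List.nodup_pyRange_one (-20) 21))
    intro a b hab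
    exact congrArg Prod.snd hab
  · refine List.Pairwise.imp ?_ (PySem.List.pairwise_lt_pyRange_one (-20) 21)
    intro a b hab x hx1 hx2
    rcases List.mem_map.mp hx1 with ⟨dy, _, rfl⟩
    rcases List.mem_map.mp hx2 with ⟨dy2, _, heq⟩
    have : b = a := congrArg Prod.fst heq
    omega

-- ---- A's counting loop computes the full double sum ----

theorem pv_keys_nodup (d : PySem.Dict Int (Int × Int)) (P : List (Int × Int))
    (h : d.items = PySem.List.enumerate P 0) : d.keys.Nodup := by
  simp only [PySem.Dict.keys, h]
  exact pv_enum_fst_nodup P 0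

theorem pv_getD_eq (d : PySem.Dict Int (Int × Int)) (P : List (Int × Int))
    (h : d.items = PySem.List.enumerate P 0) (i : Nat) (hi : i < P.length) :
    d.getD ((i : Nat) : Int) (0,0) = P.getD i (0,0) := by
  have hmem : (((i : Nat) : Int), P.getD i (0,0)) ∈ d.items := by
    rw [h]
    simpa using pv_mem_enum (0,0) P 0 i hi
  exact PySem.Dict.getD_of_mem_items d hmem (pv_keys_nodup d P h) (0,0)

theorem pv_innerA_eq (d : PySem.Dict Int (Int × Int)) (P : List (Int × Int))
    (h : d.items = PySem.List.enumerate P 0) (s : Nat) (out : Int) :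
    pvInnerA d (P.length : Int) ((s : Nat) : Int) (P.getD s (0,0)) out
      = out + ∑ i ∈ Finset.Ico (s + 101) P.length, pvF P s i := by
  unfold pvInnerA
  rw [show (fun (acc : Int) (i : Int) =>
      let t2 := d.getD i (0, 0)
      let dd := |(P.getD s (0,0)).1 - t2.1| + |(P.getD s (0,0)).2 - t2.2|
      if dd ≤ 20 ∧ 100 ≤ i - ((s : Nat) : Int) - dd then acc + 1 else acc)
    = (fun (acc : Int) (i : Int) => acc +
        (if |(P.getD s (0,0)).1 - (d.getD i (0,0)).1| + |(P.getD s (0,0)).2 - (d.getD i (0,0)).2| ≤ 20 ∧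
            100 ≤ i - ((s : Nat) : Int) -
              (|(P.getD s (0,0)).1 - (d.getD i (0,0)).1| + |(P.getD s (0,0)).2 - (d.getD i (0,0)).2|)
          then 1 else 0)) from by
    funext acc i
    dsimp only
    split_ifs <;> ring]
  rw [PySem.List.foldl_add]
  congr 1
  rw [PySem.List.pyRange_one, List.map_map, pv_sum_range, Finset.sum_Ico_eq_sum_range]
  have hn : ((P.length : Int) - (((s : Nat) : Int) + 101)).toNat = P.length - (s + 101) := by
    omega
  rw [hn]
  refine Finset.sum_congr rfl (fun k hk => ?_)
  have hk' : k < P.length - (s + 101) := Finset.mem_range.mp hk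
  have hik : s + 101 + k < P.length := by omega
  have hci : ((s : Nat) : Int) + 101 + (k : Int) = (((s + 101 + k : Nat)) : Int) := by
    push_cast; ring
  simp only [Function.comp_apply]
  rw [hci, pv_getD_eq d P h (s + 101 + k) hik]
  unfold pvF pvD
  push_cast
  ring_nf

theorem pv_outerA_eq (d : PySem.Dict Int (Int × Int)) (P : List (Int × Int))
    (h : d.items = PySem.List.enumerate P 0) :
    ∀ (m k : Nat) (out : Int), P.length - k = m → k ≤ pvM P.length →
    pvOuterA d (P.length : Int) (PySem.List.enumerate (P.drop k) ((k : Nat) : Int)) out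
      = out + ∑ s ∈ Finset.Ico k (pvM P.length),
          ∑ i ∈ Finset.Ico (s + 101) P.length, pvF P s i := by
  intro m
  induction m with
  | zero =>
    intro k out hm hk
    have hk' : P.length ≤ k := by omega
    have hM := pvM_le P.length
    rw [List.drop_eq_nil_of_le hk', pv_enum_nil]
    rw [Finset.Ico_eq_empty (by omega)]
    simp [pvOuterA]
  | succ m ih =>
    intro k out hm hk
    have hklt : k < P.length := by omega
    rw [List.drop_eq_getElem_cons hklt, PySem.List.enumerate_cons]
    simp only [pvOuterA]
    by_cases hbrk : ((k : Nat) : Int) = (P.length : Int) - 100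
    · rw [if_pos hbrk]
      have h100 : 100 ≤ P.length := by omega
      have hkM : k = pvM P.length := by unfold pvM; rw [if_pos h100]; omega
      rw [hkM, Finset.Ico_self, Finset.sum_empty, add_zero]
    · rw [if_neg hbrk]
      have hkM : k < pvM P.length := by
        unfold pvM at hk ⊢
        split_ifs at hk ⊢ with h100
        · omega
        · omega
      rw [← List.getD_eq_getElem P (0,0) hklt]
      rw [pv_innerA_eq d P h k out]
      have hc : ((k : Nat) : Int) + 1 = (((k + 1 : Nat)) : Int) := by push_cast; ring
      rw [hc, ih (k + 1) _ (by omega) (by omega)]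
      rw [Finset.sum_eq_sum_Ico_succ_bot hkM]
      ring

theorem pv_inner_ext (P : List (Int × Int)) (hnd : P.Nodup) (s : Nat) (hs : s < pvM P.length) :
    ∑ i ∈ Finset.Ico (s + 101) P.length, pvF P s i
      = ∑ i ∈ Finset.range P.length, pvF P s i := by
  have hsl : s < P.length := lt_of_lt_of_le hs (pvM_le _)
  rw [Finset.range_eq_Ico]
  by_cases hsp : s + 101 ≤ P.length
  · rw [← Finset.sum_Ico_consecutive (fun i => pvF P s i) (Nat.zero_le (s + 101)) hsp]
    have hz : ∑ i ∈ Finset.Ico 0 (s + 101), pvF P s i = 0 :=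
      Finset.sum_eq_zero (fun i hi => pv_V1 P hnd s i hsl
        (by have := (Finset.mem_Ico.mp hi).2; omega) (Finset.mem_Ico.mp hi).2)
    rw [hz, zero_add]
  · rw [Finset.Ico_eq_empty (by omega), Finset.sum_empty]
    exact (Finset.sum_eq_zero (fun i hi => pv_V1 P hnd s i hsl
      (Finset.mem_Ico.mp hi).2 (by have := (Finset.mem_Ico.mp hi).2; omega))).symm

theorem pv_A_total (d : PySem.Dict Int (Int × Int)) (P : List (Int × Int))
    (h : d.items = PySem.List.enumerate P 0) (hnd : P.Nodup) :
    pvOuterA d (P.length : Int) d.items 0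
      = ∑ s ∈ Finset.range P.length, ∑ i ∈ Finset.range P.length, pvF P s i := by
  have h0 := pv_outerA_eq d P h P.length 0 0 (by omega) (by omega)
  rw [List.drop_zero, Nat.cast_zero, ← h] at h0
  rw [h0, zero_add]
  have hM := pvM_le P.length
  calc ∑ s ∈ Finset.Ico 0 (pvM P.length), ∑ i ∈ Finset.Ico (s + 101) P.length, pvF P s i
      = ∑ s ∈ Finset.Ico 0 (pvM P.length), ∑ i ∈ Finset.range P.length, pvF P s i :=
        Finset.sum_congr rfl (fun s hs => pv_inner_ext P hnd s (Finset.mem_Ico.mp hs).2)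
    _ = ∑ s ∈ Finset.range P.length, ∑ i ∈ Finset.range P.length, pvF P s i := by
        rw [Finset.range_eq_Ico,
          ← Finset.sum_Ico_consecutive (fun s => ∑ i ∈ Finset.Ico 0 P.length, pvF P s i)
            (Nat.zero_le (pvM P.length)) hM]
        have hz : ∑ s ∈ Finset.Ico (pvM P.length) P.length,
            ∑ i ∈ Finset.Ico 0 P.length, pvF P s i = 0 :=
          Finset.sum_eq_zero (fun s hs => Finset.sum_eq_zero (fun i hi =>
            pv_V2 P s i (Finset.mem_Ico.mp hs).1 (Finset.mem_Ico.mp hi).2))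
        rw [hz, add_zero]

-- ---- B's dictionary and neighbourhood scan compute the same double sum ----

def pvG (P : List (Int × Int)) (s : Nat) (off : Int × Int) : Int :=
  match (pvSteps P).get? ((P.getD s (0,0)).1 + off.1, (P.getD s (0,0)).2 + off.2) with
  | some i => if 100 ≤ i - ((s : Nat) : Int) - |off.1| - |off.2| then 1 else 0
  | none => 0

theorem pv_steps_items (P : List (Int × Int)) (hnd : P.Nodup) :
    (pvSteps P).items = (PySem.List.enumerate P 0).map (fun p => (p.2, p.1)) := by
  unfold pvSteps
  have := PySem.Dict.items_foldl_insert_fresh (PySem.List.enumerate P 0) Prod.snd Prod.fst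
    PySem.Dict.empty (fun a _ => PySem.Dict.contains_empty a.2) (by rw [pv_enum_snd]; exact hnd)
  simpa using this

theorem pv_steps_keys (P : List (Int × Int)) (hnd : P.Nodup) : (pvSteps P).keys = P := by
  simp only [PySem.Dict.keys, pv_steps_items P hnd, List.map_map]
  have hc : ((fun x : (Int × Int) × Int => x.1) ∘ fun p : Int × (Int × Int) => (p.2, p.1))
      = Prod.snd := by funext p; rfl
  rw [hc]
  exact pv_enum_snd P 0

theorem pv_steps_get?_none (P : List (Int × Int)) (hnd : P.Nodup) (q : Int × Int)
    (hq : q ∉ P) : (pvSteps P).get? q = none := by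
  rw [PySem.Dict.get?_eq_none_iff_not_mem_keys, pv_steps_keys P hnd]
  exact hq

theorem pv_steps_get?_some (P : List (Int × Int)) (hnd : P.Nodup) (k : Nat)
    (hk : k < P.length) : (pvSteps P).get? (P.getD k (0,0)) = some ((k : Nat) : Int) := by
  rw [PySem.Dict.get?_eq_some_iff_mem_items _ _ _
    (by rw [pv_steps_keys P hnd]; exact hnd)]
  rw [pv_steps_items P hnd]
  exact List.mem_map.mpr ⟨(((k : Nat) : Int), P.getD k (0,0)),
    by simpa using pv_mem_enum (0,0) P 0 k hk, rfl⟩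

theorem pv_countB_eq (P : List (Int × Int)) (hnd : P.Nodup) (out : Int) (s : Nat)
    (_hs : s < P.length) :
    pvCountB (pvSteps P) out ((s : Nat) : Int) (P.getD s (0,0))
      = out + ∑ i ∈ Finset.range P.length, pvF P s i := by
  unfold pvCountB
  rw [show (fun (out2 : Int) (off : Int × Int) =>
      match (pvSteps P).get? ((P.getD s (0,0)).1 + off.1, (P.getD s (0,0)).2 + off.2) with
      | some i => if 100 ≤ i - ((s : Nat) : Int) - |off.1| - |off.2| then out2 + 1 else out2
      | none => out2)
    = (fun (out2 : Int) (off : Int × Int) => out2 + pvG P s off) from by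
      funext out2 off
      unfold pvG
      cases hx : (pvSteps P).get? ((P.getD s (0,0)).1 + off.1, (P.getD s (0,0)).2 + off.2) with
      | none => simp
      | some i => dsimp only; split_ifs <;> ring]
  rw [PySem.List.foldl_add]
  congr 1
  rw [← List.sum_toFinset _ pv_offs_nodup]
  have key : ∀ off ∈ pvOffsets.toFinset, pvG P s off
      = ∑ i ∈ Finset.range P.length,
          (if P.getD i (0,0) = ((P.getD s (0,0)).1 + off.1, (P.getD s (0,0)).2 + off.2)
            then pvF P s i else 0) := by
    intro off hoff
    by_cases hmem : ((P.getD s (0,0)).1 + off.1, (P.getD s (0,0)).2 + off.2) ∈ P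
    · obtain ⟨k, hk, hPk⟩ := List.mem_iff_getElem.mp hmem
      have hPk' : P.getD k (0,0)
          = ((P.getD s (0,0)).1 + off.1, (P.getD s (0,0)).2 + off.2) := by
        rw [List.getD_eq_getElem P (0,0) hk]; exact hPk
      have hg : pvG P s off
          = if 100 ≤ ((k : Nat) : Int) - ((s : Nat) : Int) - |off.1| - |off.2|
            then 1 else 0 := by
        unfold pvG
        rw [← hPk', pv_steps_get?_some P hnd k hk]
      have hsum : (∑ i ∈ Finset.range P.length,
          (if P.getD i (0,0) = ((P.getD s (0,0)).1 + off.1, (P.getD s (0,0)).2 + off.2)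
            then pvF P s i else 0)) = pvF P s k := by
        calc (∑ i ∈ Finset.range P.length,
            (if P.getD i (0,0) = ((P.getD s (0,0)).1 + off.1, (P.getD s (0,0)).2 + off.2)
              then pvF P s i else 0))
            = ∑ i ∈ Finset.range P.length, (if i = k then pvF P s i else 0) := by
              refine Finset.sum_congr rfl (fun i hi => ?_)
              by_cases hik : i = k
              · subst hik; rw [if_pos hPk', if_pos rfl]
              · rw [if_neg, if_neg hik]
                intro hEq
                apply hik
                have hik2 := hEq.trans hPk'.symm
                rw [List.getD_eq_getElem P (0,0) (Finset.mem_range.mp hi),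
                  List.getD_eq_getElem P (0,0) hk] at hik2
                exact hnd.getElem_inj_iff.mp hik2
          _ = if k ∈ Finset.range P.length then pvF P s k else 0 :=
              Finset.sum_ite_eq' (Finset.range P.length) k (fun i => pvF P s i)
          _ = pvF P s k := by rw [if_pos (Finset.mem_range.mpr hk)]
      rw [hg, hsum]
      unfold pvF
      have hdD : pvD (P.getD s (0,0)) (P.getD k (0,0)) = |off.1| + |off.2| := by
        rw [hPk']
        unfold pvD
        dsimp only
        have e1 : (P.getD s (0,0)).1 - ((P.getD s (0,0)).1 + off.1) = -off.1 := by ring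
        have e2 : (P.getD s (0,0)).2 - ((P.getD s (0,0)).2 + off.2) = -off.2 := by ring
        rw [e1, e2, abs_neg, abs_neg]
      rw [hdD]
      have hle : |off.1| + |off.2| ≤ 20 := (pv_offs_mem off).mp (List.mem_toFinset.mp hoff)
      by_cases hcc : 100 ≤ ((k : Nat) : Int) - ((s : Nat) : Int) - |off.1| - |off.2|
      · rw [if_pos hcc, if_pos ⟨hle, by omega⟩]
      · rw [if_neg hcc, if_neg]
        rintro ⟨-, hc2⟩
        omega
    · have hg : pvG P s off = 0 := by
        unfold pvG
        rw [pv_steps_get?_none P hnd _ hmem]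
      rw [hg]
      symm
      apply Finset.sum_eq_zero
      intro i hi
      rw [if_neg]
      intro hEq
      apply hmem
      rw [← hEq, List.getD_eq_getElem P (0,0) (Finset.mem_range.mp hi)]
      exact List.getElem_mem _
  rw [Finset.sum_congr rfl key, Finset.sum_comm]
  refine Finset.sum_congr rfl (fun i hi => ?_)
  have hcond : ∀ off : Int × Int,
      (P.getD i (0,0) = ((P.getD s (0,0)).1 + off.1, (P.getD s (0,0)).2 + off.2))
        ↔ off = ((P.getD i (0,0)).1 - (P.getD s (0,0)).1,
                 (P.getD i (0,0)).2 - (P.getD s (0,0)).2) := by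
    intro off
    constructor
    · intro hEq
      have h1 := congrArg Prod.fst hEq
      have h2 := congrArg Prod.snd hEq
      dsimp at h1 h2
      apply Prod.ext <;> dsimp <;> omega
    · intro hEq
      subst hEq
      apply Prod.ext <;> dsimp <;> ring
  calc (∑ off ∈ pvOffsets.toFinset,
      if P.getD i (0,0) = ((P.getD s (0,0)).1 + off.1, (P.getD s (0,0)).2 + off.2)
        then pvF P s i else 0)
      = ∑ off ∈ pvOffsets.toFinset,
          (if off = ((P.getD i (0,0)).1 - (P.getD s (0,0)).1,
                     (P.getD i (0,0)).2 - (P.getD s (0,0)).2) then pvF P s i else 0) :=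
        Finset.sum_congr rfl (fun off _ => if_congr (hcond off) rfl rfl)
    _ = if ((P.getD i (0,0)).1 - (P.getD s (0,0)).1,
            (P.getD i (0,0)).2 - (P.getD s (0,0)).2) ∈ pvOffsets.toFinset
          then pvF P s i else 0 :=
        Finset.sum_ite_eq' pvOffsets.toFinset _ (fun _ => pvF P s i)
    _ = pvF P s i := by
        by_cases hcmem : ((P.getD i (0,0)).1 - (P.getD s (0,0)).1,
            (P.getD i (0,0)).2 - (P.getD s (0,0)).2) ∈ pvOffsets.toFinset
        · rw [if_pos hcmem]
        · rw [if_neg hcmem]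
          symm
          unfold pvF
          rw [if_neg]
          rintro ⟨h1, -⟩
          apply hcmem
          refine List.mem_toFinset.mpr ((pv_offs_mem _).mpr ?_)
          dsimp only
          unfold pvD at h1
          rw [abs_sub_comm ((P.getD i (0,0)).1), abs_sub_comm ((P.getD i (0,0)).2)]
          exact h1

theorem pv_B_total (P : List (Int × Int)) (hnd : P.Nodup) :
    pvCountBAll (pvSteps P) P
      = ∑ s ∈ Finset.range P.length, ∑ i ∈ Finset.range P.length, pvF P s i := by
  unfold pvCountBAll
  have hcong : ∀ p ∈ PySem.List.enumerate P 0, ∀ out : Int,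
      pvCountB (pvSteps P) out p.1 p.2
        = out + ∑ i ∈ Finset.range P.length, pvF P p.1.toNat i := by
    intro p hp out
    obtain ⟨k, hk, h1, h2⟩ := pv_enum_mem (0,0) P 0 p hp
    have hp1 : p.1 = ((k : Nat) : Int) := by omega
    have hp1' : p.1.toNat = k := by omega
    rw [hp1, h2]
    have hkt : ((k : Nat) : Int).toNat = k := by omega
    rw [hkt]
    exact pv_countB_eq P hnd out k hk
  rw [PySem.List.foldl_congr_mem' (PySem.List.enumerate P 0)
    (fun out (p : Int × (Int × Int)) => pvCountB (pvSteps P) out p.1 p.2)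
    (fun out (p : Int × (Int × Int)) =>
      out + ∑ i ∈ Finset.range P.length, pvF P p.1.toNat i) 0 hcong]
  rw [PySem.List.foldl_add, zero_add,
    pv_enum_sum (0,0) (fun p => ∑ i ∈ Finset.range P.length, pvF P p.1.toNat i) P 0]
  rw [pv_sum_range]
  refine Finset.sum_congr rfl (fun j hj => ?_)
  have hz : ((0 : Int) + (j : Int)).toNat = j := by omega
  rw [hz]

-- ---- main ----

theorem pv_main (data : List String) : part2 data = part2_alt data := by
  have hparse := pv_parse data
  have hd := pv_scan_dist data
  rw [hparse] at hd
  unfold part2 part2_alt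
  rw [hparse]
  cases hS : ((pvCellsB data).filter (fun c => decide (c.2 = 'S'))).getLast? with
  | none =>
    cases hE : ((pvCellsB data).filter (fun c => decide (c.2 = 'E'))).getLast? <;>
      simp only [Option.elim_none, Option.elim_some]
  | some sC =>
    cases hE : ((pvCellsB data).filter (fun c => decide (c.2 = 'E'))).getLast? with
    | none => simp only [Option.elim_none, Option.elim_some]
    | some eC =>
      rw [hS, hE] at hd
      simp only [Option.elim_some] at hd ⊢
      obtain ⟨hTnd, hsT, heT, hse⟩ := hd
      set s := sC.1 with hs_def
      set e := eC.1 with he_def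
      set T := PySem.Set.ofList
        (((pvCellsB data).filter (fun c => decide (c.2 = '.'))).map Prod.fst) with hT_def
      have hsT' : s ∉ T := hsT s rfl
      have heT' : e ∉ T := heT e rfl
      have hse' : s ≠ e := hse s e rfl rfl
      obtain ⟨hRnd, hRmem⟩ := pv_walkRev_inv T.length T [s] s (List.nodup_singleton s)
        hTnd (fun t ht hmem => hsT' ((List.mem_singleton.mp hmem) ▸ ht))
      have heR : e ∉ pvWalkRevB T.length T [s] s := by
        intro hmem
        rcases hRmem e hmem with hm | hm
        · exact hse' ((List.mem_singleton.mp hm).symm)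
        · exact heT' hm
      have hPnd : ((pvWalkRevB T.length T [s] s).reverse ++ [e]).Nodup := by
        rw [List.nodup_append]
        refine ⟨List.nodup_reverse.mpr hRnd, List.nodup_singleton e, fun a ha b hb => ?_⟩
        rcases List.mem_singleton.mp hb with rfl
        intro hab
        exact heR (List.mem_reverse.mp (hab ▸ ha))
      have hinit : (PySem.Dict.empty.insert 0 s).items
          = PySem.List.enumerate ([s].reverse) 0 := rfl
      have h1cast : (1 : Int) = ((([s] : List (Int × Int)).reverse.length : Nat) : Int) := by
        simp
      rw [h1cast]
      obtain ⟨hWitems, hWn⟩ :=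
        pv_walk_rel T.length T s (PySem.Dict.empty.insert 0 s) [s] hinit
      have hPitems : ((pvWalkA T.length T (PySem.Dict.empty.insert 0 s) s
            ((([s] : List (Int × Int)).reverse.length : Nat) : Int)).1.insert
          (pvWalkA T.length T (PySem.Dict.empty.insert 0 s) s
            ((([s] : List (Int × Int)).reverse.length : Nat) : Int)).2 e).items
          = PySem.List.enumerate ((pvWalkRevB T.length T [s] s).reverse ++ [e]) 0 := by
        rw [hWn]
        exact pv_items_snoc _ ((pvWalkRevB T.length T [s] s).reverse) e hWitems
      unfold pvCountA
      have hsz : ((pvWalkA T.length T (PySem.Dict.empty.insert 0 s) s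
            ((([s] : List (Int × Int)).reverse.length : Nat) : Int)).1.insert
          (pvWalkA T.length T (PySem.Dict.empty.insert 0 s) s
            ((([s] : List (Int × Int)).reverse.length : Nat) : Int)).2 e).size
          = ((pvWalkRevB T.length T [s] s).reverse ++ [e]).length := by
        show ((pvWalkA T.length T (PySem.Dict.empty.insert 0 s) s
            ((([s] : List (Int × Int)).reverse.length : Nat) : Int)).1.insert
          (pvWalkA T.length T (PySem.Dict.empty.insert 0 s) s
            ((([s] : List (Int × Int)).reverse.length : Nat) : Int)).2 e).items.length = _
        rw [hPitems, pv_enum_length]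
      rw [hsz]
      exact (pv_A_total _ _ hPitems hPnd).trans (pv_B_total _ hPnd).symm

-- ===== VERDICT (by name: the statement is the Claim_ definition above) =====
theorem part2_spec : Claim_equal_part2 := by
  intro data _ _
  unfold Spec_part2
  exact pv_main data
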